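-- pv_equiv track=rewrite | github.com/masca9993/2.5VRD-VisualKnowledge | utils.py | find_transitive_triplets
-- ===== SOURCE A (Python) =====
-- def find_transitive_triplets(relations):
--     all_transitive_triplets = []
--
--     for rel1 in relations:
--         for rel2 in relations:
--             if rel1[1] == rel2[0]:
--                 all_transitive_triplets.append([rel1[0], rel1[1], rel2[1]])
--
--     triplets = all_transitive_triplets.copy()
--
--     for tr in all_transitive_triplets:
--         if [tr[0], tr[2]] not in relations:
--             triplets.remove(tr)
--
--     return triplets
-- ===== SOURCE B (Python) =====
-- def find_transitive_triplets(relations):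
--     by_source = {}
--     for r in relations:
--         by_source.setdefault(r[0], []).append(r[1])
--     edges = set()
--     for r in relations:
--         if len(r) == 2:
--             edges.add((r[0], r[1]))
--     out = []
--     for rel in relations:
--         a, b = rel[0], rel[1]
--         for c in by_source.get(b, []):
--             if (a, c) in edges:
--                 out.append([a, b, c])
--     return out
-- ===== Notes on version B (the rewrite author's own statement) =====
-- stated objective: faster
-- what changed: Replaces the quadratic nested scan plus the list-membership/remove fixup pass by one indexed pass: an adjacency dict from each node to its ordered successor list and a set of 2-element edges, so each relation's triplets come from a dict lookup filtered by set membership.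
import Mathlib
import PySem

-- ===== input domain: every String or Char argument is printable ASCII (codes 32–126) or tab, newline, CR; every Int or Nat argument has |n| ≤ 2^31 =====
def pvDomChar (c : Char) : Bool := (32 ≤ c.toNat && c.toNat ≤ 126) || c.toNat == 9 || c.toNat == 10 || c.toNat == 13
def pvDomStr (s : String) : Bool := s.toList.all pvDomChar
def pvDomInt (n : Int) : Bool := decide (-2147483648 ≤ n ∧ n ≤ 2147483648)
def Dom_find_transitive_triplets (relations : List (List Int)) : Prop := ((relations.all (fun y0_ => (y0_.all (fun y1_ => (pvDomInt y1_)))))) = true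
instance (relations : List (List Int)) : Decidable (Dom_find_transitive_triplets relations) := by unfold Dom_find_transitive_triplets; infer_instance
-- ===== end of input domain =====

-- B replaces A's quadratic nested scan + list remove pass by one indexed pass over an
-- adjacency dict and an edge set (objective: faster).

-- total form of Python's r[i] for a nonnegative literal index; exact under Pre_ (indices in range)
def pvIdx (r : List Int) (i : Nat) : Int := (PySem.List.pyGet? r (i : Int)).getD 0

-- ===== PORT A =====
def find_transitive_triplets (relations : List (List Int)) : List (List Int) :=
  let all_transitive_triplets :=
    relations.foldl (fun acc rel1 =>
      relations.foldl (fun acc rel2 =>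
        if pvIdx rel1 1 == pvIdx rel2 0 then
          acc ++ [[pvIdx rel1 0, pvIdx rel1 1, pvIdx rel2 1]]
        else acc) acc) []
  -- triplets = all_transitive_triplets.copy(); for tr in …: if [tr0,tr2] not in relations: triplets.remove(tr)
  all_transitive_triplets.foldl (fun triplets tr =>
    if [pvIdx tr 0, pvIdx tr 2] ∉ relations then
      (PySem.List.remove? triplets tr).getD triplets   -- remove() never fails here: tr is in triplets
    else triplets) all_transitive_triplets

-- ===== PORT B =====
def find_transitive_triplets_alt (relations : List (List Int)) : List (List Int) :=
  -- by_source.setdefault(r[0], []).append(r[1])  ==  d[r[0]] = d.get(r[0], []) + [r[1]]  == Dict.modify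
  let by_source : PySem.Dict Int (List Int) :=
    relations.foldl (fun d r => d.modify (pvIdx r 0) [] (· ++ [pvIdx r 1])) PySem.Dict.empty
  let edges : PySem.Set (Int × Int) :=
    relations.foldl (fun s r =>
      if r.length == 2 then PySem.Set.add s (pvIdx r 0, pvIdx r 1) else s) PySem.Set.empty
  relations.foldl (fun out rel =>
    let a := pvIdx rel 0
    let b := pvIdx rel 1
    (by_source.getD b []).foldl (fun out c =>
      if PySem.Set.contains edges (a, c) then out ++ [[a, b, c]] else out) out) []

-- ===== PRECONDITION & SPEC =====
-- Pre_ excludes exactly the inputs on which Python A raises IndexError: a relation of length < 2.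
def Pre_find_transitive_triplets (relations : List (List Int)) : Prop :=
  ∀ r ∈ relations, 2 ≤ r.length
instance (relations : List (List Int)) : Decidable (Pre_find_transitive_triplets relations) := by
  unfold Pre_find_transitive_triplets; infer_instance
def pvWitness_find_transitive_triplets : List (List Int) := [[1, 2], [2, 3], [1, 3]]

def Spec_find_transitive_triplets (relations : List (List Int)) (out : List (List Int)) : Prop :=
  out = find_transitive_triplets_alt relations
instance (relations : List (List Int)) (out : List (List Int)) : Decidable (Spec_find_transitive_triplets relations out) := by
  unfold Spec_find_transitive_triplets; infer_instance

-- ===== CLAIM (what is proved, stated in full; the proofs are below) =====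
def Claim_equal_find_transitive_triplets : Prop :=
  ∀ (relations : List (List Int)), Dom_find_transitive_triplets relations →
    Pre_find_transitive_triplets relations →
    Spec_find_transitive_triplets relations (find_transitive_triplets relations)

-- ===== LEMMAS AND PROOFS =====

-- the common normal form both ports are reduced to
def pvSpine (relations : List (List Int)) : List (List Int) :=
  relations.flatMap (fun r1 =>
    ((relations.filter (fun r2 =>
        decide (pvIdx r2 0 = pvIdx r1 1) &&
        decide ([pvIdx r1 0, pvIdx r2 1] ∈ relations))).map
      (fun r2 => [pvIdx r1 0, pvIdx r1 1, pvIdx r2 1])))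

theorem pv_removal (relations : List (List Int)) :
    ∀ (l acc : List (List Int)), (∀ x ∈ acc, [pvIdx x 0, pvIdx x 2] ∈ relations) →
      l.foldl (fun triplets tr =>
        if [pvIdx tr 0, pvIdx tr 2] ∉ relations then
          (PySem.List.remove? triplets tr).getD triplets
        else triplets) (acc ++ l)
      = acc ++ l.filter (fun tr => decide ([pvIdx tr 0, pvIdx tr 2] ∈ relations)) := by
  intro l
  induction l with
  | nil => intro acc _; simp
  | cons x l ih =>
    intro acc hacc
    by_cases hx : [pvIdx x 0, pvIdx x 2] ∈ relations
    · rw [List.foldl_cons, if_neg (by simpa using hx)]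
      have h2 := ih (acc ++ [x]) (by
        intro y hy
        rcases List.mem_append.1 hy with h | h
        · exact hacc y h
        · simp at h; subst h; exact hx)
      rw [show acc ++ x :: l = (acc ++ [x]) ++ l by simp, h2, List.filter_cons,
        if_pos (by simpa using hx)]
      simp
    · rw [List.foldl_cons, if_pos hx]
      have hmem : x ∈ acc ++ x :: l := by simp
      rw [PySem.List.remove?_eq_some_erase _ x hmem]
      have hne : x ∉ acc := fun h => hx (hacc x h)
      rw [List.erase_append_right _ hne, List.erase_cons_head, Option.getD_some,
        ih acc hacc, List.filter_cons, if_neg (by simpa using hx)]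

theorem pv_beq_decide (x y : Int) : (x == y) = decide (x = y) := by
  by_cases h : x = y <;> simp [h]

theorem pv_beq_comm (x y : Int) : (x == y) = decide (y = x) := by
  rw [pv_beq_decide]
  simp [eq_comm]

theorem pv_A_eq_spine (relations : List (List Int)) :
    find_transitive_triplets relations = pvSpine relations := by
  unfold find_transitive_triplets
  simp only [PySem.List.foldl_append_if]
  simp only [PySem.List.foldl_append_eq_flatMap, List.nil_append]
  have hfold := pv_removal relations
    (relations.flatMap (fun rel1 =>
      (relations.filter (fun rel2 => pvIdx rel1 1 == pvIdx rel2 0)).map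
        (fun rel2 => [pvIdx rel1 0, pvIdx rel1 1, pvIdx rel2 1])))
    [] (by intro x hx; simp at hx)
  simp only [List.nil_append] at hfold
  rw [hfold]
  unfold pvSpine
  rw [List.filter_flatMap]
  congr 1
  funext r1
  rw [List.filter_map, List.filter_filter]
  congr 1
  apply List.filter_congr
  intro r2 _
  have h0 : pvIdx [pvIdx r1 0, pvIdx r1 1, pvIdx r2 1] 0 = pvIdx r1 0 := rfl
  have h2 : pvIdx [pvIdx r1 0, pvIdx r1 1, pvIdx r2 1] 2 = pvIdx r2 1 := rfl
  simp only [Function.comp_apply, h0, h2]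
  rw [Bool.and_comm, pv_beq_comm]

theorem pv_mem_edges (relations : List (List Int)) :
    ∀ (s₀ : List (Int × Int)) (p : Int × Int),
      p ∈ relations.foldl (fun s r =>
          if r.length == 2 then PySem.Set.add s (pvIdx r 0, pvIdx r 1) else s) s₀
        ↔ p ∈ s₀ ∨ ∃ r ∈ relations, r.length = 2 ∧ pvIdx r 0 = p.1 ∧ pvIdx r 1 = p.2 := by
  induction relations with
  | nil => simp
  | cons r rs ih =>
    intro s₀ p
    simp only [List.foldl_cons]
    by_cases h : r.length = 2
    · rw [if_pos (by simpa using h)]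
      rw [ih]
      rw [PySem.Set.mem_add]
      constructor
      · rintro (⟨hp | hp⟩ | hrest)
        · exact Or.inl hp
        · exact Or.inr ⟨r, by simp, h, by rw [hp], by rw [hp]⟩
        · rcases hrest with ⟨r', hr', hl, h0, h1⟩
          exact Or.inr ⟨r', by simp [hr'], hl, h0, h1⟩
      · rintro (hp | ⟨r', hr', hl, h0, h1⟩)
        · exact Or.inl (Or.inl hp)
        · rcases List.mem_cons.1 hr' with rfl | hr'
          · exact Or.inl (Or.inr (by cases p; simp_all))
          · exact Or.inr ⟨r', hr', hl, h0, h1⟩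
    · rw [if_neg (by simpa using h)]
      rw [ih]
      constructor
      · rintro (hp | ⟨r', hr', hl, h0, h1⟩)
        · exact Or.inl hp
        · exact Or.inr ⟨r', by simp [hr'], hl, h0, h1⟩
      · rintro (hp | ⟨r', hr', hl, h0, h1⟩)
        · exact Or.inl hp
        · rcases List.mem_cons.1 hr' with rfl | hr'
          · exact absurd hl h
          · exact Or.inr ⟨r', hr', hl, h0, h1⟩

theorem pv_two_iff (r : List Int) (a c : Int) :
    (r.length = 2 ∧ pvIdx r 0 = a ∧ pvIdx r 1 = c) ↔ r = [a, c] := by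
  constructor
  · rintro ⟨hl, h0, h1⟩
    match r, hl with
    | [x, y], _ =>
      have e0 : pvIdx [x, y] 0 = x := rfl
      have e1 : pvIdx [x, y] 1 = y := rfl
      rw [e0] at h0
      rw [e1] at h1
      rw [h0, h1]
  · rintro rfl
    exact ⟨rfl, rfl, rfl⟩

theorem pv_edges_iff (relations : List (List Int)) (a c : Int) :
    PySem.Set.contains
      (relations.foldl (fun s r =>
        if r.length == 2 then PySem.Set.add s (pvIdx r 0, pvIdx r 1) else s)
        PySem.Set.empty) (a, c)
      = decide ([a, c] ∈ relations) := by
  have hmem : (a, c) ∈ relations.foldl (fun s r =>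
        if r.length == 2 then PySem.Set.add s (pvIdx r 0, pvIdx r 1) else s)
        PySem.Set.empty ↔ [a, c] ∈ relations := by
    rw [pv_mem_edges]
    constructor
    · rintro (h | ⟨r, hr, hl, h0, h1⟩)
      · simp [PySem.Set.empty] at h
      · have := (pv_two_iff r a c).1 ⟨hl, h0, h1⟩
        rw [← this]; exact hr
    · intro h
      exact Or.inr ⟨[a, c], h, ((pv_two_iff [a, c] a c).2 rfl).1,
        (((pv_two_iff [a, c] a c).2 rfl).2 : _ ∧ _).1, ((((pv_two_iff [a, c] a c).2 rfl).2 : _ ∧ _)).2⟩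
  by_cases h : [a, c] ∈ relations
  · rw [decide_eq_true h, PySem.Set.contains_iff]
    exact hmem.2 h
  · rw [decide_eq_false h, Bool.eq_false_iff]
    intro hc
    exact h (hmem.1 ((PySem.Set.contains_iff _ _).1 hc))

theorem pv_bysource (relations : List (List Int)) (b : Int) :
    (relations.foldl (fun d r => d.modify (pvIdx r 0) [] (· ++ [pvIdx r 1]))
        PySem.Dict.empty).getD b []
      = (relations.filter (fun r => pvIdx r 0 == b)).map (fun r => pvIdx r 1) := by
  have hm : relations.foldl (fun d r => d.modify (pvIdx r 0) [] (· ++ [pvIdx r 1]))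
        PySem.Dict.empty
      = (relations.map (fun r => (pvIdx r 0, pvIdx r 1))).foldl
          (fun d p => d.modify p.1 [] (· ++ [p.2])) PySem.Dict.empty := by
    rw [List.foldl_map]
  rw [hm, PySem.Dict.getD_foldl_modify_append, PySem.Dict.getD_empty]
  rw [List.filter_map, List.map_map]
  simp [Function.comp_def]

theorem pv_B_eq_spine (relations : List (List Int)) :
    find_transitive_triplets_alt relations = pvSpine relations := by
  unfold find_transitive_triplets_alt
  have hin : ∀ (rel : List Int) (out : List (List Int)),
      ((relations.foldl (fun d r => d.modify (pvIdx r 0) [] (· ++ [pvIdx r 1]))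
          PySem.Dict.empty).getD (pvIdx rel 1) []).foldl
        (fun out c =>
          if PySem.Set.contains
              (relations.foldl (fun s r =>
                if r.length == 2 then PySem.Set.add s (pvIdx r 0, pvIdx r 1) else s)
                PySem.Set.empty) (pvIdx rel 0, c)
          then out ++ [[pvIdx rel 0, pvIdx rel 1, c]] else out) out
      = out ++ ((relations.filter (fun r2 =>
            decide (pvIdx r2 0 = pvIdx rel 1) &&
            decide ([pvIdx rel 0, pvIdx r2 1] ∈ relations))).map
          (fun r2 => [pvIdx rel 0, pvIdx rel 1, pvIdx r2 1])) := by
    intro rel out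
    rw [PySem.List.foldl_append_if, pv_bysource, List.filter_map, List.map_map,
      List.filter_filter]
    congr 1
    congr 1
    apply List.filter_congr
    intro r2 _
    simp only [Function.comp_apply, pv_edges_iff]
    rw [Bool.and_comm, pv_beq_decide]
  rw [PySem.List.foldl_congr_mem relations _ _ [] (fun out rel _ => hin rel out)]
  rw [PySem.List.foldl_append_eq_flatMap]
  rfl

-- ===== VERDICT (by name: the statement is the Claim_ definition above) =====
theorem find_transitive_triplets_spec : Claim_equal_find_transitive_triplets := by
  intro relations _ _
  unfold Spec_find_transitive_triplets
  rw [pv_A_eq_spine, pv_B_eq_spine]
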